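-- pv_equiv track=rewrite | github.com/gitonthescene/demos | Python/hanoi.py | genStacks
-- ===== SOURCE A (Python) =====
-- def genDisc( sz, max ):
--     halfdisc = "*"* sz
--     fill = " "*(max-sz)
--     return fill+halfdisc+halfdisc+fill
--
-- def genStacks( pegs, max ):
--     res = ""
--     level = max
--     while level > 0:
--         level = level - 1
--         for i in [0,1,2]:
--             if len( pegs[i] ) > level:
--                 res += genDisc( pegs[i][level]+1, max )
--             else:
--                 res += genDisc( 0, max )
--         res += "\n"
--     return res
-- ===== SOURCE B (Python) =====
-- def genDisc(sz, max):
--     halfdisc = "*" * sz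
--     fill = " " * (max - sz)
--     return fill + halfdisc + halfdisc + fill
--
-- def genStacks(pegs, max):
--     # peg-major: build each peg's column of rendered discs (top row first),
--     # then recombine row-wise by transposing the three columns.
--     def disc(i, lv):
--         peg = pegs[i]
--         return genDisc(peg[lv] + 1, max) if len(peg) > lv else genDisc(0, max)
--     def col(i):
--         return [disc(i, max - 1 - r) for r in range(max)]
--     c0, c1, c2 = col(0), col(1), col(2)
--     return "".join(a + b + c + "\n" for a, b, c in zip(c0, c1, c2))
-- ===== Notes on version B (the rewrite author's own statement) =====
-- stated objective: alternative
-- what changed: A interleaves pegs inside a top-down level loop accumulating one growing string; B builds each peg's full column as a list of disc strings and then recombines them row-wise with zip, joining once at the end.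
import Mathlib
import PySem

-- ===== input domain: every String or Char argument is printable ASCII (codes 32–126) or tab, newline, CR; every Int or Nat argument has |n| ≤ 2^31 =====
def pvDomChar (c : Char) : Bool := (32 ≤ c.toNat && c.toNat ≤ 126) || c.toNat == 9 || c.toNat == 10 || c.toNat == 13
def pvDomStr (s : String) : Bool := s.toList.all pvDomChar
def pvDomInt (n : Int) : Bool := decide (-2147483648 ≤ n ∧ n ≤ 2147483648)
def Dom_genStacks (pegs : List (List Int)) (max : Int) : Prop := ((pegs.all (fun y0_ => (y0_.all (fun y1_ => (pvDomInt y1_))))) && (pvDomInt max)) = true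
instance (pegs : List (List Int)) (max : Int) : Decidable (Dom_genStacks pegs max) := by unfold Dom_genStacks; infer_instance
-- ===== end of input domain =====

-- B replaces A's level-outer/peg-inner string accumulation by peg-major column lists recombined row-wise (alternative decomposition, same cost).

-- ===== PORT A =====
-- shared module helper genDisc (on List Char; the final String.ofList packs the chars)
def genDiscC (sz max : Int) : List Char :=
  let halfdisc := PySem.List.pyRepeat ['*'] sz
  let fill := PySem.List.pyRepeat [' '] (max - sz)
  fill ++ halfdisc ++ halfdisc ++ fill

def genStacksLoop (pegs : List (List Int)) (max : Int) : Nat → Int → List Char → List Char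
  | 0, _, res => res
  | fuel + 1, level, res =>
    let lv := level - 1
    let res := [(0 : Int), 1, 2].foldl (fun r i =>
      let peg := (PySem.List.pyGet? pegs i).getD []
      if lv < (peg.length : Int) then
        r ++ genDiscC ((PySem.List.pyGet? peg lv).getD 0 + 1) max
      else
        r ++ genDiscC 0 max) res
    genStacksLoop pegs max fuel lv (res ++ ['\n'])

def genStacks (pegs : List (List Int)) (max : Int) : String :=
  String.ofList (genStacksLoop pegs max max.toNat max [])

-- ===== PORT B =====
def discAlt (pegs : List (List Int)) (max i lv : Int) : List Char :=
  let peg := (PySem.List.pyGet? pegs i).getD []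
  if lv < (peg.length : Int) then
    genDiscC ((PySem.List.pyGet? peg lv).getD 0 + 1) max
  else
    genDiscC 0 max

def genStacks_alt (pegs : List (List Int)) (max : Int) : String :=
  let col := fun (i : Int) => (PySem.List.pyRange 0 max 1).map (fun r => discAlt pegs max i (max - 1 - r))
  let c0 := col 0
  let c1 := col 1
  let c2 := col 2
  String.ofList (List.zipWith3 (fun a b c => a ++ b ++ c ++ ['\n']) c0 c1 c2).flatten

-- ===== PRECONDITION & SPEC =====
-- Pre_ excludes exactly the inputs where A raises IndexError: max > 0 with fewer than 3 pegs.
def Pre_genStacks (pegs : List (List Int)) (max : Int) : Prop := max ≤ 0 ∨ 3 ≤ pegs.length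
instance (pegs : List (List Int)) (max : Int) : Decidable (Pre_genStacks pegs max) := by unfold Pre_genStacks; infer_instance
def pvWitness_genStacks : List (List Int) × Int := ([[0], [], [1]], 2)

def Spec_genStacks (pegs : List (List Int)) (max : Int) (out : String) : Prop := out = genStacks_alt pegs max
instance (pegs : List (List Int)) (max : Int) (out : String) : Decidable (Spec_genStacks pegs max out) := by unfold Spec_genStacks; infer_instance

-- ===== CLAIM (what is proved, stated in full; the proofs are below) =====
def Claim_equal_genStacks : Prop := ∀ (pegs : List (List Int)) (max : Int), Dom_genStacks pegs max → Pre_genStacks pegs max → Spec_genStacks pegs max (genStacks pegs max)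

-- ===== LEMMAS AND PROOFS =====

def rowC (pegs : List (List Int)) (max lv : Int) : List Char :=
  discAlt pegs max 0 lv ++ discAlt pegs max 1 lv ++ discAlt pegs max 2 lv ++ ['\n']

theorem genStacksLoop_eq (pegs : List (List Int)) (max : Int) :
    ∀ (n : Nat) (level : Int) (res : List Char),
      genStacksLoop pegs max n level res
        = res ++ ((List.range n).map (fun (r : Nat) => rowC pegs max (level - 1 - (r : Int)))).flatten := by
  intro n
  induction n with
  | zero => intro level res; simp [genStacksLoop]
  | succ n ih =>
    intro level res
    have hstep : genStacksLoop pegs max (n + 1) level res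
        = genStacksLoop pegs max n (level - 1) (res ++ rowC pegs max (level - 1)) := by
      simp only [genStacksLoop, List.foldl, rowC, discAlt]
      split_ifs <;> simp [List.append_assoc]
    rw [hstep, ih]
    rw [List.range_succ_eq_map]
    have hcast : ∀ r : Nat, level - 1 - ((r + 1 : Nat) : Int) = level - 1 - 1 - (r : Int) := by
      intro r; push_cast; ring
    simp only [List.map_cons, List.map_map, Function.comp_def, List.flatten_cons,
      Nat.succ_eq_add_one, hcast, Int.natCast_zero, sub_zero, List.append_assoc]

theorem zipWith3_map_same {α β : Type} (f : β → β → β → β) (g0 g1 g2 : α → β) :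
    ∀ (l : List α),
      List.zipWith3 f (l.map g0) (l.map g1) (l.map g2)
        = l.map (fun x => f (g0 x) (g1 x) (g2 x)) := by
  intro l
  induction l with
  | nil => rfl
  | cons x xs ih => simp [List.zipWith3, ih]

-- ===== VERDICT (by name: the statement is the Claim_ definition above) =====
theorem genStacks_spec : Claim_equal_genStacks := by
  intro pegs max _ _
  unfold Spec_genStacks genStacks genStacks_alt
  rw [genStacksLoop_eq, PySem.List.pyRange_one]
  simp only [List.map_map]
  rw [zipWith3_map_same]
  simp [rowC, List.append_assoc]
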